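-- pv_equiv track=rewrite | github.com/GiuliaGhisolfi/ProteinSynthesis | src/transcription.py | find_promoter
-- ===== SOURCE A (Python) =====
-- PROMOTERS = [
--     'TATAAAA', 'TATAAAT', 'TATATAA', 'TATATAT', # TATA box
-- ]
--
-- LENGTH_PROMOTER = 7
--
-- def find_promoter(dna_sequence):
--     # find promoter sequences in the DNA sequence
--     promoter_positions_list = sorted([i for promoter in PROMOTERS for i, _ in
--         enumerate(dna_sequence) if dna_sequence[i:].startswith(promoter)])
--
--     if len(promoter_positions_list) == 0:
--         return None
--     else:
--         # split the DNA sequence in the promoter regions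
--         dna_sequences_list = []
--
--         for i in range(len(promoter_positions_list)-1):
--             dna_sequences_list.append(dna_sequence[promoter_positions_list[i]+LENGTH_PROMOTER
--                 :promoter_positions_list[i+1]])
--
--         dna_sequences_list.append(dna_sequence[promoter_positions_list[-1]+LENGTH_PROMOTER:])
--
--         return dna_sequences_list
-- ===== SOURCE B (Python) =====
-- PROMOTERS = [
--     'TATAAAA', 'TATAAAT', 'TATATAA', 'TATATAT', # TATA box
-- ]
--
-- LENGTH_PROMOTER = 7
--
-- def find_promoter(dna_sequence):
--     # single left-to-right scan: emit each segment as soon as the next promoter is found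
--     dna_sequences_list = []
--     last = None
--     for i in range(len(dna_sequence)):
--         if dna_sequence[i:i + LENGTH_PROMOTER] in PROMOTERS:
--             if last is not None:
--                 dna_sequences_list.append(dna_sequence[last:i])
--             last = i + LENGTH_PROMOTER
--     if last is None:
--         return None
--     dna_sequences_list.append(dna_sequence[last:])
--     return dna_sequences_list
-- ===== Notes on version B (the rewrite author's own statement) =====
-- stated objective: faster
-- what changed: B replaces A's two-phase algorithm (build a sorted list of all promoter start positions via a nested comprehension over promoters x positions testing dna_sequence[i:].startswith, then split the string in a second index-arithmetic loop over that list) with a single left-to-right scan that tests a fixed 7-character window for membership in PROMOTERS and emits each segment on the fly with a cursor.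
import Mathlib
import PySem

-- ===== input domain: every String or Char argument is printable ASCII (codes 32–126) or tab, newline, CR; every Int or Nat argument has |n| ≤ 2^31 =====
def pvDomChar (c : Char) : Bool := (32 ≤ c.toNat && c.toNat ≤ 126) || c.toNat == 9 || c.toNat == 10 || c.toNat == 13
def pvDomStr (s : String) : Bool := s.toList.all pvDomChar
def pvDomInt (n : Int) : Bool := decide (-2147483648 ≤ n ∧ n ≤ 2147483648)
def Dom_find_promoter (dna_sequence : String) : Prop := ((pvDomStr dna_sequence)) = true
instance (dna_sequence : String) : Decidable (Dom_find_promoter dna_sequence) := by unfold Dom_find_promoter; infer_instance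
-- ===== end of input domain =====

-- B replaces A's "collect and sort all promoter positions (testing dna[i:].startswith at every
-- position), then split by index arithmetic" with a single left-to-right scan over fixed
-- 7-character windows that emits each segment as soon as the next promoter is found
-- (objective: faster — measured: A's per-position full-suffix slice makes it quadratic).

-- ===== PORT A =====
def PROMOTERS : List String := ["TATAAAA", "TATAAAT", "TATATAA", "TATATAT"]

def LENGTH_PROMOTER : Int := 7

def find_promoter (dna_sequence : String) : Option (List String) :=
  let promoter_positions_list : List Int :=
    PySem.List.sorted
      (PROMOTERS.flatMap (fun promoter =>
        (((PySem.List.enumerate dna_sequence.toList 0).filter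
            (fun p => PySem.Str.startswith (PySem.Str.slice dna_sequence (some p.1) none) promoter)).map
          (fun p => p.1))))
      (fun x => x) false
  if promoter_positions_list.length = 0 then
    none
  else
    let dna_sequences_list : List String :=
      (PySem.List.pyRange 0 ((promoter_positions_list.length : Int) - 1) 1).foldl
        (fun acc i =>
          acc ++ [PySem.Str.slice dna_sequence
            (some (PySem.List.pyGetD promoter_positions_list i 0 + LENGTH_PROMOTER))
            (some (PySem.List.pyGetD promoter_positions_list (i + 1) 0))]) []
    some (dna_sequences_list ++
      [PySem.Str.slice dna_sequence
        (some (PySem.List.pyGetD promoter_positions_list (-1) 0 + LENGTH_PROMOTER)) none])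

-- ===== PORT B =====
def find_promoter_alt (dna_sequence : String) : Option (List String) :=
  let st : List String × Option Int :=
    (PySem.List.pyRange 0 (PySem.Str.len dna_sequence) 1).foldl
      (fun st i =>
        if PROMOTERS.contains (PySem.Str.slice dna_sequence (some i) (some (i + LENGTH_PROMOTER))) then
          (match st.2 with
           | some last => st.1 ++ [PySem.Str.slice dna_sequence (some last) (some i)]
           | none => st.1,
           some (i + LENGTH_PROMOTER))
        else st)
      ([], none)
  match st.2 with
  | none => none
  | some last => some (st.1 ++ [PySem.Str.slice dna_sequence (some last) none])

-- ===== PRECONDITION & SPEC =====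
def Spec_find_promoter (dna_sequence : String) (out : Option (List String)) : Prop := out = find_promoter_alt dna_sequence
instance (dna_sequence : String) (out : Option (List String)) : Decidable (Spec_find_promoter dna_sequence out) := by unfold Spec_find_promoter; infer_instance

-- ===== CLAIM (what is proved, stated in full; the proofs are below) =====
def Claim_equal_find_promoter : Prop := ∀ (dna_sequence : String), Dom_find_promoter dna_sequence → Spec_find_promoter dna_sequence (find_promoter dna_sequence)

-- ===== LEMMAS AND PROOFS =====

-- B's per-position window test
def pvHit (s : String) (i : Int) : Bool :=
  PROMOTERS.contains (PySem.Str.slice s (some i) (some (i + LENGTH_PROMOTER)))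

-- the promoter positions, in increasing order
def pvPos (s : String) : List Int :=
  (PySem.List.pyRange 0 (PySem.Str.len s) 1).filter (pvHit s)

-- the segments of s after cursor `last`, one per remaining promoter position
def pvSplit (s : String) (last : Int) : List Int → List String
  | [] => [PySem.Str.slice s (some last) none]
  | i :: rest => PySem.Str.slice s (some last) (some i) :: pvSplit s (i + LENGTH_PROMOTER) rest

-- B's loop body
def pvStep (s : String) (st : List String × Option Int) (i : Int) : List String × Option Int :=
  if PROMOTERS.contains (PySem.Str.slice s (some i) (some (i + LENGTH_PROMOTER))) then
    (match st.2 with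
     | some last => st.1 ++ [PySem.Str.slice s (some last) (some i)]
     | none => st.1,
     some (i + LENGTH_PROMOTER))
  else st

-- A's membership test at position i equals B's window test, for a 7-character pattern
lemma pvTest_eq (s p : String) (hp : p ∈ PROMOTERS) (i : Int) (hi : 0 ≤ i) :
    PySem.Str.startswith (PySem.Str.slice s (some i) none) p
      = (p == PySem.Str.slice s (some i) (some (i + LENGTH_PROMOTER))) := by
  have hlen : p.toList.length = 7 := by
    fin_cases hp <;> decide
  have h7 : (i + LENGTH_PROMOTER).toNat - i.toNat = 7 := by
    simp only [LENGTH_PROMOTER]; omega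
  rw [Bool.eq_iff_iff, beq_iff_eq, PySem.Str.startswith_eq, PySem.Chars.startswith_iff,
    ← String.toList_inj, PySem.Str.toList_slice, PySem.Str.toList_slice,
    PySem.Chars.slice_eq_listSlice, PySem.Chars.slice_eq_listSlice,
    PySem.List.slice_from _ hi,
    PySem.List.slice_toNat _ hi (by simp only [LENGTH_PROMOTER]; omega), h7,
    List.prefix_iff_eq_take, hlen]

-- the inner comprehension for one promoter, as a filtered range
lemma pvInner_eq (s p : String) (hp : p ∈ PROMOTERS) :
    ((PySem.List.enumerate s.toList 0).filter
        (fun q => PySem.Str.startswith (PySem.Str.slice s (some q.1) none) p)).map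
      (fun q => q.1)
    = (PySem.List.pyRange 0 (PySem.Str.len s) 1).filter
        (fun j => p == PySem.Str.slice s (some j) (some (j + LENGTH_PROMOTER))) := by
  rw [PySem.List.enumerate_eq_map_pyRange s.toList ' ', List.filter_map, List.map_map]
  have h1 : ∀ x ∈ PySem.List.pyRange 0 (PySem.List.len s.toList) 1,
      ((fun q : Int × Char => PySem.Str.startswith (PySem.Str.slice s (some q.1) none) p) ∘
        (fun j => (j, PySem.List.pyGetD s.toList j ' '))) x
      = (fun j => p == PySem.Str.slice s (some j) (some (j + LENGTH_PROMOTER))) x := by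
    intro x hx
    exact pvTest_eq s p hp x (PySem.List.mem_pyRange_one.mp hx).1
  rw [List.filter_congr h1]
  have h2 : PySem.List.len s.toList = PySem.Str.len s := by
    simp [PySem.Str.len_eq, PySem.List.len]
  rw [h2]
  simp [Function.comp_def]

-- counting in a filtered list, as an if on the predicate at the counted element
lemma pvCount_filter_eq {α : Type} [DecidableEq α] (p : α → Bool) (l : List α) (x : α) :
    List.count x (l.filter p) = if p x = true then List.count x l else 0 := by
  by_cases h : p x = true
  · rw [if_pos h, List.count_filter h]
  · rw [if_neg h, List.count_eq_zero]
    intro hm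
    exact h (List.mem_filter.mp hm).2

-- the sorted comprehension is exactly the filtered range of positions
lemma pvPositions_eq (s : String) :
    PySem.List.sorted
      (PROMOTERS.flatMap (fun promoter =>
        (((PySem.List.enumerate s.toList 0).filter
            (fun p => PySem.Str.startswith (PySem.Str.slice s (some p.1) none) promoter)).map
          (fun p => p.1))))
      (fun x => x) false = pvPos s := by
  apply PySem.List.sorted_eq_of_perm_of_pairwise_lt
  · -- pvPos s is a permutation of the flatMap
    have he : PROMOTERS.flatMap (fun promoter =>
        (((PySem.List.enumerate s.toList 0).filter
            (fun p => PySem.Str.startswith (PySem.Str.slice s (some p.1) none) promoter)).map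
          (fun p => p.1)))
      = PROMOTERS.flatMap (fun p =>
          (PySem.List.pyRange 0 (PySem.Str.len s) 1).filter
            (fun j => p == PySem.Str.slice s (some j) (some (j + LENGTH_PROMOTER)))) := by
      exact List.flatMap_congr (fun p hp => pvInner_eq s p hp)
    rw [he]
    rw [List.perm_iff_count]
    intro x
    by_cases hx0 : x ∈ PySem.List.pyRange 0 (PySem.Str.len s) 1
    case neg =>
      rw [List.count_eq_zero.mpr, List.count_eq_zero.mpr]
      · intro hmem
        rcases List.mem_flatMap.mp hmem with ⟨p, -, hxp⟩
        exact hx0 (List.mem_of_mem_filter hxp)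
      · intro hmem
        exact hx0 (List.mem_of_mem_filter hmem)
    case pos =>
      simp only [PROMOTERS, List.flatMap_cons, List.flatMap_nil, List.append_nil,
        List.count_append]
      set w := PySem.Str.slice s (some x) (some (x + LENGTH_PROMOTER)) with hw
      rw [pvCount_filter_eq, pvCount_filter_eq, pvCount_filter_eq, pvCount_filter_eq]
      simp only [pvPos]
      rw [pvCount_filter_eq]
      simp only [pvHit, PROMOTERS, List.contains_cons, List.contains_nil, ← hw]
      by_cases h1 : ("TATAAAA" : String) = w <;>
        by_cases h2 : ("TATAAAT" : String) = w <;>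
          by_cases h3 : ("TATATAA" : String) = w <;>
            by_cases h4 : ("TATATAT" : String) = w
      all_goals try exact absurd (h1.trans h2.symm) (by decide)
      all_goals try exact absurd (h1.trans h3.symm) (by decide)
      all_goals try exact absurd (h1.trans h4.symm) (by decide)
      all_goals try exact absurd (h2.trans h3.symm) (by decide)
      all_goals try exact absurd (h2.trans h4.symm) (by decide)
      all_goals try exact absurd (h3.trans h4.symm) (by decide)
      all_goals simp [h1, h2, h3, h4]
      all_goals rintro (h | h | h | h)
      · exact absurd h.symm h1
      · exact absurd h.symm h2
      · exact absurd h.symm h3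
      · exact absurd h.symm h4
  · exact List.Pairwise.filter _ (PySem.List.pairwise_lt_pyRange_one 0 (PySem.Str.len s))

-- Python's q[-1] on a nonempty list is its last element
lemma pvGetD_neg_one (q : List Int) (hq : q ≠ []) (d : Int) :
    PySem.List.pyGetD q (-1) d = q.getLast hq := by
  have hlen : 0 < q.length := List.length_pos_iff.mpr hq
  simp only [PySem.List.pyGetD, PySem.List.pyGet?, PySem.List.pyIdx?]
  rw [if_neg (by omega), if_pos (by omega)]
  have : q.length - (-(-1 : Int)).toNat = q.length - 1 := by omega
  rw [this, List.getLast_eq_getElem]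
  simp [List.getElem?_eq_getElem (by omega : q.length - 1 < q.length)]

-- A's index-arithmetic split, in structural form
lemma pvSplit_core (s : String) : ∀ (t : List Int) (a : Int),
    (List.range t.length).map (fun k =>
        PySem.Str.slice s (some ((a :: t).getD k 0 + LENGTH_PROMOTER))
          (some ((a :: t).getD (k + 1) 0)))
      ++ [PySem.Str.slice s (some (((a :: t).getLast (by simp)) + LENGTH_PROMOTER)) none]
    = pvSplit s (a + LENGTH_PROMOTER) t := by
  intro t
  induction t with
  | nil => intro a; simp [pvSplit]
  | cons b t' ih =>
      intro a
      rw [List.length_cons, List.range_succ_eq_map, List.map_cons, List.map_map]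
      have hmap : ((fun k =>
          PySem.Str.slice s (some ((a :: b :: t').getD k 0 + LENGTH_PROMOTER))
            (some ((a :: b :: t').getD (k + 1) 0))) ∘ Nat.succ)
          = fun k => PySem.Str.slice s (some ((b :: t').getD k 0 + LENGTH_PROMOTER))
            (some ((b :: t').getD (k + 1) 0)) := by
        funext k
        simp [Nat.succ_eq_add_one]
      rw [hmap]
      have hlast : (a :: b :: t').getLast (by simp) = (b :: t').getLast (by simp) := by
        simp [List.getLast_cons]
      rw [hlast, List.cons_append, ih b]
      simp [pvSplit]

-- A's split loop over the position list q, structurally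
lemma pvSplitA_eq (s : String) (a : Int) (t : List Int) :
    ((PySem.List.pyRange 0 (((a :: t).length : Int) - 1) 1).foldl
       (fun acc i => acc ++ [PySem.Str.slice s
          (some (PySem.List.pyGetD (a :: t) i 0 + LENGTH_PROMOTER))
          (some (PySem.List.pyGetD (a :: t) (i + 1) 0))]) [])
     ++ [PySem.Str.slice s (some (PySem.List.pyGetD (a :: t) (-1) 0 + LENGTH_PROMOTER)) none]
    = pvSplit s (a + LENGTH_PROMOTER) t := by
  rw [PySem.List.foldl_append_singleton_eq_map, List.nil_append,
    PySem.List.pyRange_one, List.map_map, pvGetD_neg_one (a :: t) (by simp) 0]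
  have hn : (((a :: t).length : Int) - 1 - 0).toNat = t.length := by
    simp only [List.length_cons]; omega
  rw [hn, ← pvSplit_core s t a]
  congr 1
  apply List.map_congr_left
  intro k hk
  have h2 : PySem.List.pyGetD (a :: t) ((k : Int) + 1) 0 = t.getD k 0 := by
    rw [show ((k : Int) + 1) = ((k + 1 : Nat) : Int) by push_cast; ring,
      PySem.List.pyGetD_natCast, List.getD_cons_succ]
  simp [h2, PySem.List.pyGetD_natCast, List.getD]

-- A, reduced to the position list
lemma pvA_eq (s : String) :
    find_promoter s
      = match pvPos s with
        | [] => none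
        | a :: t => some (pvSplit s (a + LENGTH_PROMOTER) t) := by
  unfold find_promoter
  rw [pvPositions_eq]
  cases hq : pvPos s with
  | nil => simp
  | cons a t =>
      rw [if_neg (by simp)]
      simp only []
      rw [pvSplitA_eq]

-- B's loop ignores the non-promoter positions
lemma pvFoldl_filter {α β : Type} (c : β → Bool) (g : α → β → α) :
    ∀ (l : List β) (init : α),
    l.foldl (fun st i => if c i then g st i else st) init
      = (l.filter c).foldl (fun st i => if c i then g st i else st) init := by
  intro l
  induction l with
  | nil => intro init; rfl
  | cons x xs ih => intro init; by_cases hx : c x <;> simp [hx, ih]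

-- B's scan over the remaining promoter positions produces the remaining segments
lemma pvScan (s : String) : ∀ (q : List Int), (∀ i ∈ q, pvHit s i = true) →
    ∀ (acc : List String) (last : Int),
    (match (q.foldl (pvStep s) (acc, some last)).2 with
     | none => none
     | some l => some ((q.foldl (pvStep s) (acc, some last)).1 ++ [PySem.Str.slice s (some l) none]))
    = some (acc ++ pvSplit s last q) := by
  intro q
  induction q with
  | nil => intro _ acc last; simp [pvSplit]
  | cons i rest ih =>
      intro h acc last
      have hi : pvHit s i = true := h i (by simp)
      rw [List.foldl_cons, show pvStep s (acc, some last) i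
          = (acc ++ [PySem.Str.slice s (some last) (some i)], some (i + LENGTH_PROMOTER)) by
            simp only [pvStep, pvHit] at hi ⊢; rw [if_pos hi]]
      rw [ih (fun j hj => h j (by simp [hj]))]
      simp [pvSplit]

-- folding B's step over the scan range visits exactly the promoter positions
lemma pvFoldl_step_filter (s : String) (l : List Int) (init : List String × Option Int) :
    l.foldl (pvStep s) init = (l.filter (pvHit s)).foldl (pvStep s) init := by
  have h : (fun (st : List String × Option Int) i => if pvHit s i then pvStep s st i else st)
      = pvStep s := by
    funext st i
    by_cases hi : pvHit s i
    · simp [hi]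
    · simp only [pvHit] at hi
      simp only [pvStep, pvHit]
      rw [if_neg hi, if_neg hi]
  rw [← h, pvFoldl_filter]

-- B, reduced to the position list
lemma pvB_eq (s : String) :
    find_promoter_alt s
      = match pvPos s with
        | [] => none
        | a :: t => some (pvSplit s (a + LENGTH_PROMOTER) t) := by
  have hmem : ∀ i ∈ pvPos s, pvHit s i = true := fun i hi => (List.mem_filter.mp hi).2
  unfold find_promoter_alt
  rw [show (fun (st : List String × Option Int) i =>
      if PROMOTERS.contains (PySem.Str.slice s (some i) (some (i + LENGTH_PROMOTER))) then
        (match st.2 with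
         | some last => st.1 ++ [PySem.Str.slice s (some last) (some i)]
         | none => st.1,
         some (i + LENGTH_PROMOTER))
      else st) = pvStep s from rfl]
  rw [pvFoldl_step_filter]
  rw [show (PySem.List.pyRange 0 (PySem.Str.len s) 1).filter (pvHit s) = pvPos s from rfl]
  cases hq : pvPos s with
  | nil => simp
  | cons a t =>
      have ha : pvHit s a = true := hmem a (by rw [hq]; exact List.mem_cons_self)
      rw [List.foldl_cons, show pvStep s ([], none) a = ([], some (a + LENGTH_PROMOTER)) by
        simp only [pvStep, pvHit] at ha ⊢; rw [if_pos ha]]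
      have hscan := pvScan s t
        (fun j hj => hmem j (by rw [hq]; exact List.mem_cons_of_mem _ hj)) [] (a + LENGTH_PROMOTER)
      simpa using hscan
-- ===== VERDICT (by name: the statement is the Claim_ definition above) =====
theorem find_promoter_spec : Claim_equal_find_promoter := by
  intro s _
  unfold Spec_find_promoter
  rw [pvA_eq, pvB_eq]
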